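-- pv_equiv track=rewrite | github.com/JothikaKumar2501/Scam-FraudResolutionFabric | tools.py | _is_banking_related
-- ===== SOURCE A (Python) =====
-- def _is_banking_related(text: str) -> bool:
--     """
--     Determine if the content is related to banking or financial services.
--
--     Args:
--         text: Text to analyze
--
--     Returns:
--         True if banking-related, False otherwise
--     """
--     text_lower = text.lower()
--
--     banking_keywords = [
--         'bank', 'banking', 'financial', 'payment', 'transaction', 'account',
--         'credit card', 'debit card', 'atm', 'wire transfer', 'swift',
--         'fintech', 'finance', 'monetary', 'currency', 'authorized push payment',
--         'app fraud', 'payment processor', 'merchant', 'payroll', 'invoice',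
--         'financial institution', 'credit union', 'online banking', 'mobile banking',
--         'payment gateway', 'pos system', 'point of sale', 'clearing house',
--         'ach transfer', 'zelle', 'venmo', 'paypal', 'cryptocurrency exchange'
--     ]
--
--     return any(keyword in text_lower for keyword in banking_keywords)
-- ===== SOURCE B (Python) =====
-- _BANKING_KEYWORDS = (
--     'bank|banking|financial|payment|transaction|account|'
--     'credit card|debit card|atm|wire transfer|swift|'
--     'fintech|finance|monetary|currency|authorized push payment|'
--     'app fraud|payment processor|merchant|payroll|invoice|'
--     'financial institution|credit union|online banking|mobile banking|'
--     'payment gateway|pos system|point of sale|clearing house|'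
--     'ach transfer|zelle|venmo|paypal|cryptocurrency exchange'
-- ).split('|')
--
--
-- def _is_banking_related(text: str) -> bool:
--     # Position-by-position scan: walk the lowered text position by position and
--     # test whether any keyword starts at the current position, instead of one
--     # independent substring search per keyword.
--     t = text.lower()
--     i = 0
--     while i < len(t):
--         for k in _BANKING_KEYWORDS:
--             if t.startswith(k, i):
--                 return True
--         i += 1
--     return False
-- ===== Notes on version B (the rewrite author's own statement) =====
-- stated objective: alternative
-- what changed: Replaces the keyword-outer any() of independent membership substring searches with an explicit position-by-position scan of the lowered text that tests whether any keyword starts at the current position (keywords kept as one pipe-joined literal split once).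
import Mathlib
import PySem

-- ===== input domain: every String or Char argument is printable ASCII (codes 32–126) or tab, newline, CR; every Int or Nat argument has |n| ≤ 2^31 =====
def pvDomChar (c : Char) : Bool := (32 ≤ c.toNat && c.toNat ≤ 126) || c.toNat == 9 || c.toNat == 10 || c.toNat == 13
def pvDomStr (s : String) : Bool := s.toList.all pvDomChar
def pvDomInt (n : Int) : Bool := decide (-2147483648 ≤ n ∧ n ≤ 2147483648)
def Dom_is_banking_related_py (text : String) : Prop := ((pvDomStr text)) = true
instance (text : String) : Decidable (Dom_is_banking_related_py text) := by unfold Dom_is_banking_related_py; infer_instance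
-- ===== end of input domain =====

set_option maxRecDepth 4000

-- B replaces A's keyword-outer loop of independent 'keyword in text' substring searches
-- by an explicit suffix-by-suffix scan of the lowered text that tests whether any keyword
-- starts at the current position; B keeps the keywords as one '|'-joined literal split once
-- (alternative traversal, same results; not claimed faster).

-- ===== PORT A =====
-- the keyword list literal of A
def bankingKeywords : List String :=
  ["bank", "banking", "financial", "payment", "transaction", "account",
   "credit card", "debit card", "atm", "wire transfer", "swift",
   "fintech", "finance", "monetary", "currency", "authorized push payment",
   "app fraud", "payment processor", "merchant", "payroll", "invoice",
   "financial institution", "credit union", "online banking", "mobile banking",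
   "payment gateway", "pos system", "point of sale", "clearing house",
   "ach transfer", "zelle", "venmo", "paypal", "cryptocurrency exchange"]

-- any(keyword in text_lower for keyword in banking_keywords)
def is_banking_related_py (text : String) : Bool :=
  let textLower := PySem.Str.lower text
  bankingKeywords.any (fun keyword => PySem.Str.isIn keyword textLower)

-- ===== PORT B =====
-- Source B's '|'-joined keyword-string literal, written as its list of code points
-- (exact: the string is plain ASCII, and all further processing is on code points)
def bankingKeywordStr : List Char :=
  ['b', 'a', 'n', 'k', '|', 'b', 'a', 'n', 'k', 'i', 'n', 'g', '|', 'f', 'i', 'n', 'a', 'n', 'c', 'i',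
   'a', 'l', '|', 'p', 'a', 'y', 'm', 'e', 'n', 't', '|', 't', 'r', 'a', 'n', 's', 'a', 'c', 't', 'i',
   'o', 'n', '|', 'a', 'c', 'c', 'o', 'u', 'n', 't', '|', 'c', 'r', 'e', 'd', 'i', 't', ' ', 'c', 'a',
   'r', 'd', '|', 'd', 'e', 'b', 'i', 't', ' ', 'c', 'a', 'r', 'd', '|', 'a', 't', 'm', '|', 'w', 'i',
   'r', 'e', ' ', 't', 'r', 'a', 'n', 's', 'f', 'e', 'r', '|', 's', 'w', 'i', 'f', 't', '|', 'f', 'i',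
   'n', 't', 'e', 'c', 'h', '|', 'f', 'i', 'n', 'a', 'n', 'c', 'e', '|', 'm', 'o', 'n', 'e', 't', 'a',
   'r', 'y', '|', 'c', 'u', 'r', 'r', 'e', 'n', 'c', 'y', '|', 'a', 'u', 't', 'h', 'o', 'r', 'i', 'z',
   'e', 'd', ' ', 'p', 'u', 's', 'h', ' ', 'p', 'a', 'y', 'm', 'e', 'n', 't', '|', 'a', 'p', 'p', ' ',
   'f', 'r', 'a', 'u', 'd', '|', 'p', 'a', 'y', 'm', 'e', 'n', 't', ' ', 'p', 'r', 'o', 'c', 'e', 's',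
   's', 'o', 'r', '|', 'm', 'e', 'r', 'c', 'h', 'a', 'n', 't', '|', 'p', 'a', 'y', 'r', 'o', 'l', 'l',
   '|', 'i', 'n', 'v', 'o', 'i', 'c', 'e', '|', 'f', 'i', 'n', 'a', 'n', 'c', 'i', 'a', 'l', ' ', 'i',
   'n', 's', 't', 'i', 't', 'u', 't', 'i', 'o', 'n', '|', 'c', 'r', 'e', 'd', 'i', 't', ' ', 'u', 'n',
   'i', 'o', 'n', '|', 'o', 'n', 'l', 'i', 'n', 'e', ' ', 'b', 'a', 'n', 'k', 'i', 'n', 'g', '|', 'm',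
   'o', 'b', 'i', 'l', 'e', ' ', 'b', 'a', 'n', 'k', 'i', 'n', 'g', '|', 'p', 'a', 'y', 'm', 'e', 'n',
   't', ' ', 'g', 'a', 't', 'e', 'w', 'a', 'y', '|', 'p', 'o', 's', ' ', 's', 'y', 's', 't', 'e', 'm',
   '|', 'p', 'o', 'i', 'n', 't', ' ', 'o', 'f', ' ', 's', 'a', 'l', 'e', '|', 'c', 'l', 'e', 'a', 'r',
   'i', 'n', 'g', ' ', 'h', 'o', 'u', 's', 'e', '|', 'a', 'c', 'h', ' ', 't', 'r', 'a', 'n', 's', 'f',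
   'e', 'r', '|', 'z', 'e', 'l', 'l', 'e', '|', 'v', 'e', 'n', 'm', 'o', '|', 'p', 'a', 'y', 'p', 'a',
   'l', '|', 'c', 'r', 'y', 'p', 't', 'o', 'c', 'u', 'r', 'r', 'e', 'n', 'c', 'y', ' ', 'e', 'x', 'c',
   'h', 'a', 'n', 'g', 'e']

-- _BANKING_KEYWORDS = <literal>.split('|')   (sep '|' is nonempty → Chars.splitOn)
def bankingKeywordsAlt : List (List Char) :=
  PySem.Chars.splitOn bankingKeywordStr ['|']

-- the inner 'for k in _BANKING_KEYWORDS: if t.startswith(k): return True'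
def checkKeywordsAt : List (List Char) → List Char → Bool
  | [], _ => false
  | k :: ks, t => PySem.Chars.startswith t k || checkKeywordsAt ks t

-- the outer 'while i < len(t)' loop over start positions, as recursion on the
-- remaining suffix (t.startswith(k, i) is: k is a prefix of the suffix from i)
def scanSuffixes : List Char → Bool
  | [] => false
  | c :: rest => checkKeywordsAt bankingKeywordsAlt (c :: rest) || scanSuffixes rest

def is_banking_related_py_alt (text : String) : Bool :=
  scanSuffixes (PySem.Str.lower text).toList

-- ===== PRECONDITION & SPEC =====
def Spec_is_banking_related_py (text : String) (out : Bool) : Prop := out = is_banking_related_py_alt text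
instance (text : String) (out : Bool) : Decidable (Spec_is_banking_related_py text out) := by unfold Spec_is_banking_related_py; infer_instance

-- ===== CLAIM (what is proved, stated in full; the proofs are below) =====
def Claim_equal_is_banking_related_py : Prop := ∀ (text : String), Dom_is_banking_related_py text → Spec_is_banking_related_py text (is_banking_related_py text)

-- ===== LEMMAS AND PROOFS =====

theorem keywordsAlt_eq : bankingKeywordsAlt = bankingKeywords.map String.toList := by decide

theorem keywords_ne_nil : ∀ k ∈ bankingKeywords, k.toList ≠ [] := by decide

theorem checkKeywordsAt_iff (ks : List (List Char)) (t : List Char) :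
    checkKeywordsAt ks t = true ↔ ∃ k ∈ ks, k <+: t := by
  induction ks with
  | nil => simp [checkKeywordsAt]
  | cons k ks ih => simp [checkKeywordsAt, ih, PySem.Chars.startswith_iff]

theorem scanSuffixes_iff (t : List Char) :
    scanSuffixes t = true ↔ ∃ k ∈ bankingKeywords, ∃ j, k.toList <+: t.drop j := by
  induction t with
  | nil =>
    simp only [scanSuffixes, List.drop_nil, Bool.false_eq_true, false_iff]
    rintro ⟨k, hk, _, hp⟩
    exact keywords_ne_nil k hk (List.prefix_nil.mp hp)
  | cons c rest ih =>
    simp only [scanSuffixes, Bool.or_eq_true, checkKeywordsAt_iff, keywordsAlt_eq,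
      List.mem_map, ih]
    constructor
    · rintro (⟨k', ⟨k, hk, rfl⟩, hp⟩ | ⟨k, hk, j, hp⟩)
      · exact ⟨k, hk, 0, hp⟩
      · exact ⟨k, hk, j + 1, by simpa using hp⟩
    · rintro ⟨k, hk, j, hp⟩
      cases j with
      | zero => exact Or.inl ⟨k.toList, ⟨k, hk, rfl⟩, hp⟩
      | succ j => exact Or.inr ⟨k, hk, j, by simpa using hp⟩

theorem is_banking_related_eq (text : String) :
    is_banking_related_py text = is_banking_related_py_alt text := by
  unfold is_banking_related_py is_banking_related_py_alt
  rw [Bool.eq_iff_iff, scanSuffixes_iff]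
  simp only [List.any_eq_true]
  constructor
  · rintro ⟨k, hk, hin⟩
    rw [PySem.Str.isIn_iff_infix] at hin
    obtain ⟨j, hp⟩ := (PySem.Chars.exists_prefix_drop_iff_isIn
      (sub := k.toList) (s := (PySem.Str.lower text).toList)).mpr
      ((PySem.Chars.isIn_iff_infix _ _).mpr hin)
    exact ⟨k, hk, j, hp⟩
  · rintro ⟨k, hk, j, hp⟩
    refine ⟨k, hk, ?_⟩
    rw [PySem.Str.isIn_iff_infix]
    exact (PySem.Chars.isIn_iff_infix _ _).mp
      ((PySem.Chars.exists_prefix_drop_iff_isIn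
        (sub := k.toList) (s := (PySem.Str.lower text).toList)).mp ⟨j, hp⟩)

-- ===== VERDICT (by name: the statement is the Claim_ definition above) =====
theorem is_banking_related_py_spec : Claim_equal_is_banking_related_py := by
  intro text _
  unfold Spec_is_banking_related_py
  exact is_banking_related_eq text
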